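-- pv_equiv track=rewrite | github.com/nixternal/CodingChallenges | AdventOfCode/2015/17.py | part_two
-- ===== SOURCE A (Python) =====
-- import itertools
--
-- def part_two(data: list) -> int:
--     combos = [
--         seq for i in range(len(data), 0, -1) for
--         seq in itertools.combinations(data, i)
--         if sum(seq) == 150
--     ]
--
--     combos.sort(key=len)
--     return len([c for c in combos if len(c) <= len(combos[0])])
-- ===== SOURCE B (Python) =====
-- def part_two(data: list) -> int:
--     # DP over (subset size, subset sum): dp[(k, s)] = number of index-subsets of
--     # the items seen so far having size k and sum s.  Answer: count at the
--     # smallest size k >= 1 with sum 150 (0 if no subset sums to 150).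
--     dp = {(0, 0): 1}
--     for x in data:
--         new = dict(dp)
--         for (k, s), c in dp.items():
--             key = (k + 1, s + x)
--             new[key] = new.get(key, 0) + c
--         dp = new
--     sizes = [k for (k, s) in dp if s == 150 and k >= 1]
--     if not sizes:
--         return 0
--     return dp[(min(sizes), 150)]
-- ===== Notes on version B (the rewrite author's own statement) =====
-- stated objective: alternative
-- what changed: Replaces brute-force enumeration of all combinations (plus a sort by length) with a subset-sum dynamic program counting subsets by (size, sum) in a dictionary, then reads off the count at the smallest size reaching 150.
import Mathlib
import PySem

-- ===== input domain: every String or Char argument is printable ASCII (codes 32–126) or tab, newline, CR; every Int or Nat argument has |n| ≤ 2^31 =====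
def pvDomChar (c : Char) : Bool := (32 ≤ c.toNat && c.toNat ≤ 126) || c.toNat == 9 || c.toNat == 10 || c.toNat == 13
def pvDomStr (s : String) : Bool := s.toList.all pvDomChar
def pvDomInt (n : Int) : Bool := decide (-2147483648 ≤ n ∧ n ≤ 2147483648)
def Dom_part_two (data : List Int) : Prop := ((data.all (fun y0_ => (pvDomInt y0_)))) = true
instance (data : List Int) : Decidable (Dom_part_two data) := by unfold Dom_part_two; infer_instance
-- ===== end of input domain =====

-- B replaces the 2^n enumeration of combinations (plus a sort by length) with a
-- (size,sum)-subset-sum DP in a dictionary; return value only, nothing is mutated.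

-- ===== PORT A =====
-- itertools.combinations(data, r): hand-ported (not in PySem), exact — tuples in
-- lexicographic index order, each as a List Int.
def pyCombos : Nat → List Int → List (List Int)
  | 0, _ => [[]]
  | _ + 1, [] => []
  | r + 1, x :: xs => ((pyCombos r xs).map (fun t => x :: t)) ++ pyCombos (r + 1) xs

def part_two (data : List Int) : Int :=
  -- combos = [seq for i in range(len(data),0,-1) for seq in combinations(data,i) if sum(seq)==150]
  let combos : List (List Int) :=
    (PySem.List.pyRange (data.length : Int) 0 (-1)).flatMap
      (fun i => (pyCombos i.toNat data).filter (fun seq => seq.sum == 150))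
  -- combos.sort(key=len)
  let sortedCombos := PySem.List.sorted combos (fun c => c.length) false
  -- len([c for c in combos if len(c) <= len(combos[0])]); combos[0] is only
  -- evaluated when the list is nonempty (Python's lazy comprehension), so the
  -- pyGetD default [] is never observed: exact.
  ((sortedCombos.filter
      (fun c => decide (c.length ≤ (PySem.List.pyGetD sortedCombos 0 []).length))).length : Int)

-- ===== PORT B =====
def part_two_alt (data : List Int) : Int :=
  -- dp = {(0,0): 1}; for x in data: new = dict(dp); for (k,s),c in dp.items(): new[(k+1,s+x)] = new.get(..,0)+c
  let dp : PySem.Dict (Int × Int) Int :=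
    data.foldl
      (fun dp x =>
        dp.items.foldl
          (fun nd e =>
            nd.insert (e.1.1 + 1, e.1.2 + x) (nd.getD (e.1.1 + 1, e.1.2 + x) 0 + e.2))
          dp)
      ((PySem.Dict.empty).insert (0, 0) 1)
  -- sizes = [k for (k,s) in dp if s == 150 and k >= 1]
  let sizes : List Int :=
    (dp.keys.filter (fun p => p.2 == 150 && decide (1 ≤ p.1))).map (fun p => p.1)
  if sizes.isEmpty then 0
  else
    match PySem.List.min? sizes (fun k => k) with
    | none => 0   -- unreachable: sizes is nonempty here
    | some m => dp.getD (m, 150) 0   -- key (m,150) is present, so Python's dp[(m,150)] returns it: exact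

-- ===== PRECONDITION & SPEC =====
def Spec_part_two (data : List Int) (out : Int) : Prop := out = part_two_alt data
instance (data : List Int) (out : Int) : Decidable (Spec_part_two data out) := by unfold Spec_part_two; infer_instance

-- ===== CLAIM (what is proved, stated in full; the proofs are below) =====
def Claim_equal_part_two : Prop := ∀ (data : List Int), Dom_part_two data → Spec_part_two data (part_two data)

-- ===== LEMMAS AND PROOFS =====

-- g l k s = number of sub-multisets (index-subsets) of l of size k and sum s.
def pvG : List Int → Int → Int → Int
  | [], k, s => if k = 0 ∧ s = 0 then 1 else 0
  | x :: l, k, s => pvG l k s + pvG l (k - 1) (s - x)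

theorem pvG_neg : ∀ (l : List Int) (k s : Int), k < 0 → pvG l k s = 0 := by
  intro l
  induction l with
  | nil => intro k s hk; simp [pvG]; omega
  | cons x l ih => intro k s hk; simp [pvG, ih _ _ hk, ih (k-1) (s-x) (by omega)]

theorem pvG_nonneg : ∀ (l : List Int) (k s : Int), 0 ≤ pvG l k s := by
  intro l
  induction l with
  | nil => intro k s; simp [pvG]; split <;> omega
  | cons x l ih => intro k s; simp only [pvG]; have := ih k s; have := ih (k-1) (s-x); omega

theorem pvG_snoc : ∀ (l : List Int) (x k s : Int),
    pvG (l ++ [x]) k s = pvG l k s + pvG l (k - 1) (s - x) := by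
  intro l
  induction l with
  | nil => intro x k s; simp [pvG]
  | cons y l ih =>
      intro x k s
      simp only [List.cons_append, pvG, ih]
      have : s - y - x = s - x - y := by ring
      rw [this]
      ring

theorem length_mem_pyCombos : ∀ (r : Nat) (l : List Int) (t : List Int),
    t ∈ pyCombos r l → t.length = r := by
  intro r l
  induction l generalizing r with
  | nil => intro t ht; cases r <;> simp [pyCombos] at ht <;> simp [ht]
  | cons x l ih =>
      intro t ht
      cases r with
      | zero => simp [pyCombos] at ht; simp [ht]
      | succ r =>
          simp only [pyCombos, List.mem_append, List.mem_map] at ht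
          rcases ht with ⟨u, hu, rfl⟩ | ht
          · simp [ih r u hu]
          · exact ih (r+1) t ht

theorem pvCombos_count : ∀ (l : List Int) (r : Nat) (s : Int),
    ((pyCombos r l).countP (fun t => t.sum == s) : Int) = pvG l (r : Int) s := by
  intro l
  induction l with
  | nil =>
      intro r s
      cases r with
      | zero =>
          simp only [pyCombos, pvG, Nat.cast_zero]
          by_cases h : (0:Int) = s
          · subst h; simp [List.countP, List.countP.go]
          · rw [if_neg (by omega)]
            have h0 : ((0:Int) == s) = false := by simp; omega
            simp [List.countP, List.countP.go, h0]
      | succ r => simp [pyCombos, pvG]; omega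
  | cons x l ih =>
      intro r s
      cases r with
      | zero =>
          simp only [pyCombos, pvG]
          rw [show ((0:Nat):Int) - 1 = -1 by omega, pvG_neg l (-1) (s-x) (by omega)]
          rw [← ih 0 s]
          simp [pyCombos]
      | succ r =>
          simp only [pyCombos, pvG, List.countP_append, List.countP_map]
          rw [Nat.cast_add]
          push_cast
          rw [ih (r+1) s]
          rw [show ((r:Int) + 1) - 1 = (r:Int) by omega, ← ih r (s - x)]
          have : ((fun t => t.sum == s) ∘ (fun t : List Int => x :: t)) = (fun t : List Int => t.sum == s - x) := by
            funext t; simp [List.sum_cons]; constructor <;> intro h <;> omega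
          rw [this]
          push_cast
          ring

def pvStep (x : Int) (nd : PySem.Dict (Int × Int) Int) (e : (Int × Int) × Int) : PySem.Dict (Int × Int) Int :=
  nd.insert (e.1.1 + 1, e.1.2 + x) (nd.getD (e.1.1 + 1, e.1.2 + x) 0 + e.2)

theorem pvLookup_eq_get? : ∀ (l : List ((Int × Int) × Int)) (K : Int × Int),
    List.lookup K l = (PySem.Dict.mk l).get? K := by
  intro l
  induction l with
  | nil => intro K; simp [List.lookup, PySem.Dict.get?]
  | cons e t ih =>
      intro K
      obtain ⟨k0, c0⟩ := e
      rw [PySem.Dict.get?_mk_cons]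
      simp only [List.lookup]
      rw [BEq.comm (a := K) (b := k0)]
      cases h : (k0 == K) <;> simp [h, ih]

theorem pvLookup_eq_none (l : List ((Int × Int) × Int)) (K : Int × Int)
    (h : K ∉ l.map (fun e => e.1)) : List.lookup K l = none := by
  induction l with
  | nil => simp [List.lookup]
  | cons e t ih =>
      simp only [List.map, List.mem_cons] at h
      push_neg at h
      simp only [List.lookup]
      rw [show (K == e.1) = false by simp [h.1]]
      exact ih h.2

theorem pvFold_getD (x : Int) : ∀ (l : List ((Int × Int) × Int)) (nd : PySem.Dict (Int × Int) Int)
    (hnd : (l.map (fun e => e.1)).Nodup) (k s : Int),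
    (l.foldl (pvStep x) nd).getD (k, s) 0
      = nd.getD (k, s) 0 + ((List.lookup (k - 1, s - x) l).getD 0) := by
  intro l
  induction l with
  | nil => intro nd hnd k s; simp [List.lookup]
  | cons e t ih =>
      intro nd hnd k s
      obtain ⟨⟨k0, s0⟩, c0⟩ := e
      simp only [List.map, List.nodup_cons] at hnd
      simp only [List.foldl_cons]
      rw [ih _ hnd.2 k s]
      by_cases h : (k, s) = (k0 + 1, s0 + x)
      · have hk : k = k0 + 1 := congrArg Prod.fst h
        have hs : s = s0 + x := congrArg Prod.snd h
        have hkey : ((k - 1, s - x) : Int × Int) = (k0, s0) := by simp [Prod.ext_iff]; omega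
        simp only [pvStep]
        rw [PySem.Dict.getD_insert, if_pos h, h]
        simp only [List.lookup]
        rw [show (((k - 1, s - x) : Int × Int) == (k0, s0)) = true by simpa using hkey]
        rw [hkey, pvLookup_eq_none t (k0, s0) hnd.1]
        simp
      · have hne : ((k - 1, s - x) : Int × Int) ≠ (k0, s0) := by
          intro hc
          apply h
          have h1 : k - 1 = k0 := congrArg Prod.fst hc
          have h2 : s - x = s0 := congrArg Prod.snd hc
          simp [Prod.ext_iff]; omega
        simp only [pvStep]
        rw [PySem.Dict.getD_insert]
        rw [if_neg h]
        simp only [List.lookup]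
        rw [show (((k - 1, s - x) : Int × Int) == (k0, s0)) = false by simpa using hne]

theorem pvFold_contains (x : Int) : ∀ (l : List ((Int × Int) × Int)) (nd : PySem.Dict (Int × Int) Int)
    (k s : Int),
    (l.foldl (pvStep x) nd).contains (k, s)
      = (nd.contains (k, s) || (List.lookup (k - 1, s - x) l).isSome) := by
  intro l
  induction l with
  | nil => intro nd k s; simp [List.lookup]
  | cons e t ih =>
      intro nd k s
      obtain ⟨⟨k0, s0⟩, c0⟩ := e
      simp only [List.foldl_cons]
      rw [ih]
      simp only [pvStep, List.lookup]
      rw [PySem.Dict.contains_insert]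
      by_cases h : ((k, s) : Int × Int) = (k0 + 1, s0 + x)
      · have hkey : ((k - 1, s - x) : Int × Int) = (k0, s0) := by
          have hk : k = k0 + 1 := congrArg Prod.fst h
          have hs : s = s0 + x := congrArg Prod.snd h
          simp [Prod.ext_iff]; omega
        rw [show (((k, s) : Int × Int) == (k0 + 1, s0 + x)) = true by simpa using h]
        rw [show (((k - 1, s - x) : Int × Int) == (k0, s0)) = true by simpa using hkey]
        simp
      · have hkey : ((k - 1, s - x) : Int × Int) ≠ (k0, s0) := by
          intro hc
          apply h
          have h1 : k - 1 = k0 := congrArg Prod.fst hc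
          have h2 : s - x = s0 := congrArg Prod.snd hc
          simp [Prod.ext_iff]; omega
        rw [show (((k, s) : Int × Int) == (k0 + 1, s0 + x)) = false by simpa using h]
        rw [show (((k - 1, s - x) : Int × Int) == (k0, s0)) = false by simpa using hkey]
        simp


-- pvG l k s ≠ 0 forces k ≤ |l| (used to bound the minimal size)
theorem pvG_ne_zero_le : ∀ (l : List Int) (k s : Int), pvG l k s ≠ 0 → k ≤ (l.length : Int) := by
  intro l
  induction l with
  | nil => intro k s h; simp only [pvG] at h; split at h <;> simp_all
  | cons x l ih =>
      intro k s h
      simp only [pvG] at h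
      rcases (show pvG l k s ≠ 0 ∨ pvG l (k - 1) (s - x) ≠ 0 by by_contra hc; push_neg at hc; omega) with h1 | h1
      · have := ih k s h1; simp [List.length_cons]; omega
      · have := ih (k - 1) (s - x) h1; simp [List.length_cons]; omega

def pvInv (dp : PySem.Dict (Int × Int) Int) (p : List Int) : Prop :=
  dp.keys.Nodup ∧ ∀ k s : Int,
    dp.getD (k, s) 0 = pvG p k s ∧ ((dp.contains (k, s) = true) ↔ pvG p k s ≠ 0)

theorem pvInv_init : pvInv ((PySem.Dict.empty).insert (0, 0) 1) [] := by
  constructor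
  · exact PySem.Dict.nodup_keys_insert _ _ _ PySem.Dict.nodup_keys_empty
  · intro k s
    constructor
    · rw [PySem.Dict.getD_insert]
      simp only [pvG]
      by_cases h : ((k, s) : Int × Int) = (0, 0)
      · rw [if_pos h, if_pos (by exact ⟨congrArg Prod.fst h, congrArg Prod.snd h⟩)]
      · rw [if_neg h, if_neg (by intro hc; exact h (by simp [Prod.ext_iff]; omega)), PySem.Dict.getD_empty]
    · rw [PySem.Dict.contains_insert, PySem.Dict.contains_empty]
      simp only [pvG, Bool.or_false, beq_iff_eq]
      constructor
      · intro h; rw [if_pos (by exact ⟨congrArg Prod.fst h, congrArg Prod.snd h⟩)]; omega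
      · intro h
        by_cases hc : k = 0 ∧ s = 0
        · simp [Prod.ext_iff, hc]
        · rw [if_neg hc] at h; omega

theorem pvStep_inv (dp : PySem.Dict (Int × Int) Int) (p : List Int) (x : Int)
    (h : pvInv dp p) : pvInv (dp.items.foldl (pvStep x) dp) (p ++ [x]) := by
  obtain ⟨hnd, hval⟩ := h
  have hnd' : (dp.items.map (fun e => e.1)).Nodup := by
    simpa [PySem.Dict.keys] using hnd
  refine ⟨?_, ?_⟩
  · exact PySem.Dict.nodup_keys_foldl_insert_key dp.items
      (fun e => (e.1.1 + 1, e.1.2 + x)) (fun d e => d.getD (e.1.1 + 1, e.1.2 + x) 0 + e.2) dp hnd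
  · intro k s
    have hlook : List.lookup ((k - 1, s - x) : Int × Int) dp.items = dp.get? (k - 1, s - x) := by
      rw [pvLookup_eq_get?]
    have hlookD : (List.lookup ((k - 1, s - x) : Int × Int) dp.items).getD 0 = dp.getD (k - 1, s - x) 0 := by
      rw [hlook, ← PySem.Dict.getD_eq_get?_getD]
    constructor
    · rw [pvFold_getD x dp.items dp hnd' k s, hlookD, (hval k s).1, (hval (k - 1) (s - x)).1, pvG_snoc]
    · rw [pvFold_contains x dp.items dp k s, pvG_snoc]
      have hc2 : (List.lookup ((k - 1, s - x) : Int × Int) dp.items).isSome = dp.contains (k - 1, s - x) := by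
        rw [hlook, PySem.Dict.contains_eq_isSome_get?]
      rw [hc2]
      have g1 := pvG_nonneg p k s
      have g2 := pvG_nonneg p (k - 1) (s - x)
      have e1 := (hval k s).2
      have e2 := (hval (k - 1) (s - x)).2
      constructor
      · intro hh
        rcases Bool.or_eq_true_iff.mp hh with hh | hh
        · have := e1.mp hh; omega
        · have := e2.mp hh; omega
      · intro hh
        rcases (show pvG p k s ≠ 0 ∨ pvG p (k - 1) (s - x) ≠ 0 by omega) with h1 | h1
        · exact Bool.or_eq_true_iff.mpr (Or.inl (e1.mpr h1))
        · exact Bool.or_eq_true_iff.mpr (Or.inr (e2.mpr h1))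

theorem pvOuter_inv : ∀ (l : List Int) (dp : PySem.Dict (Int × Int) Int) (p : List Int),
    pvInv dp p → pvInv (l.foldl (fun dp x => dp.items.foldl (pvStep x) dp) dp) (p ++ l) := by
  intro l
  induction l with
  | nil => intro dp p h; rw [List.foldl_nil, List.append_nil]; exact h
  | cons x t ih =>
      intro dp p h
      rw [List.foldl_cons, show p ++ x :: t = (p ++ [x]) ++ t by simp]
      exact ih _ _ (pvStep_inv dp p x h)


theorem pvCountP_flatMap {α β : Type} (l : List α) (f : α → List β) (p : β → Bool) :
    (l.flatMap f).countP p = (l.map (fun a => (f a).countP p)).sum := by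
  induction l with
  | nil => simp
  | cons a t ih => simp [List.flatMap_cons, List.countP_append, ih]

theorem pvSum_zero (l : List Int) (v : Int → Int) (hv : ∀ i ∈ l, v i = 0) : (l.map v).sum = 0 := by
  induction l with
  | nil => simp
  | cons a t ih =>
      simp only [List.map_cons, List.sum_cons, hv a (by simp)]
      rw [ih (fun i hi => hv i (by simp [hi]))]
      omega

theorem pvSum_single (l : List Int) (v : Int → Int) (M C : Int) (hnd : l.Nodup) (hM : M ∈ l)
    (hv : ∀ i ∈ l, v i = if i = M then C else 0) : (l.map v).sum = C := by
  induction l with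
  | nil => simp at hM
  | cons a t ih =>
      simp only [List.nodup_cons] at hnd
      simp only [List.map_cons, List.sum_cons]
      rcases List.mem_cons.mp hM with rfl | hMt
      · rw [hv M (by simp), if_pos rfl,
          pvSum_zero t v (fun i hi => by
            rw [hv i (by simp [hi]), if_neg (by intro hc; exact hnd.1 (hc ▸ hi))])]
        omega
      · rw [hv a (by simp), if_neg (by intro hc; exact hnd.1 (hc ▸ hMt)),
          ih hnd.2 hMt (fun i hi => hv i (by simp [hi]))]
        omega

-- the comprehension list of A
def pvL (data : List Int) : List (List Int) :=
  (PySem.List.pyRange (data.length : Int) 0 (-1)).flatMap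
    (fun i => (pyCombos i.toNat data).filter (fun seq => seq.sum == 150))

theorem part_two_def (data : List Int) :
    part_two data =
      (((PySem.List.sorted (pvL data) (fun c => c.length) false).filter
        (fun c => decide (c.length ≤
          (PySem.List.pyGetD (PySem.List.sorted (pvL data) (fun c => c.length) false) 0 []).length))).length : Int) := rfl

theorem pvL_mem (data : List Int) (c : List Int) :
    c ∈ pvL data ↔ ∃ i : Int, (0 < i ∧ i ≤ (data.length : Int)) ∧
      c ∈ (pyCombos i.toNat data).filter (fun seq => seq.sum == 150) := by
  simp [pvL, List.mem_flatMap, PySem.List.mem_pyRange_neg_one, and_assoc]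

theorem pvChunk_len (data : List Int) (i : Int) (hi : 0 ≤ i) :
    ((((pyCombos i.toNat data).filter (fun seq => seq.sum == 150)).length : Nat) : Int)
      = pvG data i 150 := by
  rw [← List.countP_eq_length_filter, pvCombos_count data i.toNat 150, Int.toNat_of_nonneg hi]

theorem pvL_elem (data : List Int) (c : List Int) (h : c ∈ pvL data) :
    1 ≤ (c.length : Int) ∧ pvG data (c.length : Int) 150 ≠ 0 := by
  obtain ⟨i, ⟨hi0, hin⟩, hc⟩ := (pvL_mem data c).mp h
  rw [List.mem_filter] at hc
  have hlen : c.length = i.toNat := length_mem_pyCombos i.toNat data c hc.1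
  have hcast : ((c.length : Nat) : Int) = i := by rw [hlen]; exact Int.toNat_of_nonneg (by omega)
  have hpos : 0 < (pyCombos i.toNat data).countP (fun seq => seq.sum == 150) :=
    List.countP_pos_iff.mpr ⟨c, hc.1, hc.2⟩
  have := pvCombos_count data i.toNat 150
  rw [Int.toNat_of_nonneg (by omega)] at this
  constructor
  · omega
  · rw [hcast]; omega

theorem pvL_exists (data : List Int) (k : Int) (h1 : 1 ≤ k) (hne : pvG data k 150 ≠ 0) :
    ∃ c ∈ pvL data, (c.length : Int) = k := by
  have hkn : k ≤ (data.length : Int) := pvG_ne_zero_le data k 150 hne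
  have hcnt := pvCombos_count data k.toNat 150
  rw [Int.toNat_of_nonneg (by omega)] at hcnt
  have hpos : 0 < (pyCombos k.toNat data).countP (fun seq => seq.sum == 150) := by omega
  obtain ⟨c, hcmem, hcp⟩ := List.countP_pos_iff.mp hpos
  refine ⟨c, (pvL_mem data c).mpr ⟨k, ⟨by omega, hkn⟩, List.mem_filter.mpr ⟨hcmem, hcp⟩⟩, ?_⟩
  rw [length_mem_pyCombos k.toNat data c hcmem]
  exact Int.toNat_of_nonneg (by omega)

theorem pvA_empty (data : List Int)
    (h : ∀ k : Int, 1 ≤ k → pvG data k 150 = 0) : part_two data = 0 := by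
  have hL : pvL data = [] := by
    rw [List.eq_nil_iff_forall_not_mem]
    intro c hc
    have := pvL_elem data c hc
    exact this.2 (h _ this.1)
  rw [part_two_def, hL]
  rw [show PySem.List.sorted ([] : List (List Int)) (fun c => c.length) false = [] from
    (PySem.List.sorted_eq_nil_iff [] _ false).mpr rfl]
  simp

theorem pvA_min (data : List Int) (M : Int) (hM1 : 1 ≤ M) (hMne : pvG data M 150 ≠ 0)
    (hmin : ∀ z : Int, 1 ≤ z → pvG data z 150 ≠ 0 → M ≤ z) :
    part_two data = pvG data M 150 := by
  obtain ⟨c0, hc0L, hc0len⟩ := pvL_exists data M hM1 hMne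
  have hSne : PySem.List.sorted (pvL data) (fun c => c.length) false ≠ [] := by
    rw [Ne, PySem.List.sorted_eq_nil_iff]
    intro h; rw [h] at hc0L; simp at hc0L
  obtain ⟨hd, tl, hS⟩ := List.exists_cons_of_ne_nil hSne
  have hhdL : hd ∈ pvL data := by
    rw [← PySem.List.mem_sorted (key := fun c => (c.length : Nat)) (rev := false), hS]
    simp
  have hhd1 := pvL_elem data hd hhdL
  have hle1 : M ≤ (hd.length : Int) := hmin _ hhd1.1 hhd1.2
  have hle2 : hd.length ≤ c0.length := PySem.List.key_head_sorted_le _ _ hS c0 hc0L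
  have hhdM : ((hd.length : Nat) : Int) = M := by omega
  rw [part_two_def, hS, PySem.List.pyGetD_zero_cons]
  simp only [show hd.length = M.toNat by omega]
  rw [← List.countP_eq_length_filter, ← hS,
    (PySem.List.sorted_perm (pvL data) (fun c => c.length) false).countP_eq]
  rw [pvL]
  rw [pvCountP_flatMap]
  have hMn : M ≤ (data.length : Int) := pvG_ne_zero_le data M 150 hMne
  have hnd : (PySem.List.pyRange (data.length : Int) 0 (-1)).Nodup := by
    rw [PySem.List.pyRange_neg_one_eq_reverse]
    exact List.nodup_reverse.mpr (PySem.List.nodup_pyRange_one _ _)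
  have hMR : M ∈ PySem.List.pyRange (data.length : Int) 0 (-1) := by
    rw [PySem.List.mem_pyRange_neg_one]; omega
  rw [show ((((PySem.List.pyRange (data.length : Int) 0 (-1)).map
        (fun i => ((pyCombos i.toNat data).filter (fun seq => seq.sum == 150)).countP
          (fun c => decide (c.length ≤ M.toNat)))).sum : Nat) : Int)
      = ((PySem.List.pyRange (data.length : Int) 0 (-1)).map
        (fun i => ((((pyCombos i.toNat data).filter (fun seq => seq.sum == 150)).countP
          (fun c => decide (c.length ≤ M.toNat)) : Nat) : Int))).sum by
    rw [Nat.cast_list_sum, List.map_map]; rfl]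
  apply pvSum_single _ _ M (pvG data M 150) hnd hMR
  intro i hiR
  rw [PySem.List.mem_pyRange_neg_one] at hiR
  by_cases hiM : i = M
  · subst hiM
    rw [if_pos rfl]
    rw [List.countP_eq_length.mpr (fun c hc => by
      rw [List.mem_filter] at hc
      rw [length_mem_pyCombos i.toNat data c hc.1]
      simp)]
    exact pvChunk_len data i (by omega)
  · rw [if_neg hiM]
    rcases lt_or_gt_of_ne (show i ≠ M from hiM) with hlt | hgt
    · have hz : pvG data i 150 = 0 := by
        by_contra hc
        have := hmin i (by omega) hc
        omega
      have := pvChunk_len data i (by omega)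
      have hnil : (pyCombos i.toNat data).filter (fun seq => seq.sum == 150) = [] := by
        apply List.eq_nil_of_length_eq_zero; omega
      rw [hnil]; simp
    · rw [List.countP_eq_zero.mpr (fun c hc => by
        rw [List.mem_filter] at hc
        have := length_mem_pyCombos i.toNat data c hc.1
        simp only [decide_eq_true_eq]
        omega)]
      simp

-- the DP dictionary and size list of B
def pvDP (data : List Int) : PySem.Dict (Int × Int) Int :=
  data.foldl (fun dp x => dp.items.foldl (pvStep x) dp) ((PySem.Dict.empty).insert (0, 0) 1)

def pvSizes (data : List Int) : List Int :=
  ((pvDP data).keys.filter (fun p => p.2 == 150 && decide (1 ≤ p.1))).map (fun p => p.1)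

theorem part_two_alt_def (data : List Int) :
    part_two_alt data =
      if (pvSizes data).isEmpty then 0
      else
        match PySem.List.min? (pvSizes data) (fun k => k) with
        | none => 0
        | some m => (pvDP data).getD (m, 150) 0 := rfl

theorem pvDP_inv (data : List Int) : pvInv (pvDP data) data := by
  have := pvOuter_inv data ((PySem.Dict.empty).insert (0, 0) 1) [] pvInv_init
  rwa [List.nil_append] at this

theorem pvSizes_mem (data : List Int) (k : Int) :
    k ∈ pvSizes data ↔ (1 ≤ k ∧ pvG data k 150 ≠ 0) := by
  obtain ⟨hnd, hval⟩ := pvDP_inv data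
  constructor
  · intro h
    obtain ⟨p, hp, rfl⟩ := List.mem_map.mp h
    rw [List.mem_filter] at hp
    have h2 : p.2 = 150 ∧ 1 ≤ p.1 := by simpa using hp.2
    have hcont : (pvDP data).contains (p.1, p.2) = true := by
      rw [PySem.Dict.contains_iff_mem_keys]
      exact (show ((p.1, p.2) : Int × Int) = p by rfl) ▸ hp.1
    rw [h2.1] at hcont
    exact ⟨h2.2, (hval p.1 150).2.mp hcont⟩
  · intro ⟨h1, h2⟩
    have hcont : (pvDP data).contains (k, 150) = true := (hval k 150).2.mpr h2
    rw [PySem.Dict.contains_iff_mem_keys] at hcont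
    exact List.mem_map.mpr ⟨(k, 150), List.mem_filter.mpr ⟨hcont, by simp; omega⟩, rfl⟩

theorem pvB_empty (data : List Int)
    (h : ∀ k : Int, 1 ≤ k → pvG data k 150 = 0) : part_two_alt data = 0 := by
  have hs : pvSizes data = [] := by
    rw [List.eq_nil_iff_forall_not_mem]
    intro k hk
    have := (pvSizes_mem data k).mp hk
    exact this.2 (h k this.1)
  rw [part_two_alt_def, hs]
  simp

theorem pvB_min (data : List Int) (M : Int) (hM1 : 1 ≤ M) (hMne : pvG data M 150 ≠ 0)
    (hmin : ∀ z : Int, 1 ≤ z → pvG data z 150 ≠ 0 → M ≤ z) :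
    part_two_alt data = pvG data M 150 := by
  have hMmem : M ∈ pvSizes data := (pvSizes_mem data M).mpr ⟨hM1, hMne⟩
  have hne : pvSizes data ≠ [] := by intro h; rw [h] at hMmem; simp at hMmem
  rw [part_two_alt_def, if_neg (by simpa [List.isEmpty_iff] using hne)]
  rcases hq : PySem.List.min? (pvSizes data) (fun k => k) with _ | m
  · exact absurd ((PySem.List.min?_eq_none_iff _ _).mp hq) hne
  · have hmmem : m ∈ pvSizes data := PySem.List.min?_mem hq
    have hmmin : ∀ y ∈ pvSizes data, m ≤ y := PySem.List.min?_isMin hq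
    have h1 := (pvSizes_mem data m).mp hmmem
    have hMm : m = M := le_antisymm (hmmin M hMmem) (hmin m h1.1 h1.2)
    rw [hMm]
    exact ((pvDP_inv data).2 M 150).1

-- ===== VERDICT (by name: the statement is the Claim_ definition above) =====
theorem part_two_spec : Claim_equal_part_two := by
  intro data _
  unfold Spec_part_two
  by_cases H : ∃ k : Int, 1 ≤ k ∧ pvG data k 150 ≠ 0
  · obtain ⟨M, ⟨hM1, hMne⟩, hmin⟩ :=
      Int.exists_least_of_bdd ⟨1, fun z hz => hz.1⟩ H
    rw [pvA_min data M hM1 hMne (fun z h1 h2 => hmin z ⟨h1, h2⟩),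
        pvB_min data M hM1 hMne (fun z h1 h2 => hmin z ⟨h1, h2⟩)]
  · have h0 : ∀ k : Int, 1 ≤ k → pvG data k 150 = 0 := by
      intro k hk
      by_contra hc
      exact H ⟨k, hk, hc⟩
    rw [pvA_empty data h0, pvB_empty data h0]
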